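-- pv_equiv track=rewrite | github.com/Swap9035/CivicConnect | backend/services/nagpur_data_service/scripts/import_datasets.py | find_area_column
-- ===== SOURCE A (Python) =====
-- def find_area_column(columns: list) -> str:
--     """Find the column most likely to contain area/ward names.
--     Prioritizes 'Zone Name' since ward-level matching works via zone names too."""
--     # Priority order: ward name > zone name > other area keywords
--     priority_keywords = ["ward name", "ward_name", "zone name", "zone_name", "area", "ward", "locality", "location", "place", "zone", "region", "prabhag", "division", "constitutency"]
--     cols_lower = {c: c.lower().strip() for c in columns}
--
--     for kw in priority_keywords:
--         for col, lower in cols_lower.items():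
--             if kw == lower or kw in lower:
--                 return col
--
--     return None
-- ===== SOURCE B (Python) =====
-- def find_area_column(columns: list) -> str:
--     """Score each column by the priority index of the first keyword contained in
--     its lowercased/stripped form, then return the first column with minimal score."""
--     keywords = ["ward name", "ward_name", "zone name", "zone_name", "area", "ward", "locality", "location", "place", "zone", "region", "prabhag", "division", "constitutency"]
--
--     def score(col):
--         low = col.lower().strip()
--         for i, kw in enumerate(keywords):
--             if kw in low:
--                 return i
--         return len(keywords)
--
--     scores = [score(c) for c in columns]
--     m = len(keywords)
--     for s in scores:
--         if s < m:
--             m = s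
--     if m < len(keywords):
--         for c in columns:
--             if score(c) == m:
--                 return c
--     return None
-- ===== Notes on version B (the rewrite author's own statement) =====
-- stated objective: alternative
-- what changed: Replaces A's keyword-priority outer scan with early return by a per-column priority score (index of first matching keyword) plus a stable minimum selection over the columns.
import Mathlib
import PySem

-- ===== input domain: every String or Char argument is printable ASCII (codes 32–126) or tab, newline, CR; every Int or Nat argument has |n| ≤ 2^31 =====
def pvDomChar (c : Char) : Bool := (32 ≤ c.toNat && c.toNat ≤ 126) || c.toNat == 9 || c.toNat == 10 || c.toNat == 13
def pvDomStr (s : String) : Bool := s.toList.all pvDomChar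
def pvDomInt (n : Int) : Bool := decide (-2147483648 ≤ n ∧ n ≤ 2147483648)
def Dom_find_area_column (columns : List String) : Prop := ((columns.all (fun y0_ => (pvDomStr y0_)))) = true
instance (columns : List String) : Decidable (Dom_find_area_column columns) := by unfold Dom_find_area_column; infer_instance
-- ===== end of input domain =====

-- B replaces A's keyword-priority outer scan (early return) by a per-column priority
-- score plus a stable minimum selection; same asymptotic cost (objective: alternative).

-- the priority keyword list, shared literal constant of both Python sources
def pvKeywords : List String := ["ward name", "ward_name", "zone name", "zone_name", "area", "ward", "locality", "location", "place", "zone", "region", "prabhag", "division", "constitutency"]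

-- ===== PORT A =====
def find_area_column (columns : List String) : Option String :=
  let cols_lower : PySem.Dict String String :=
    columns.foldl (fun d c => d.insert c (PySem.Str.strip (PySem.Str.lower c))) PySem.Dict.empty
  pvKeywords.findSome? (fun kw =>
    (cols_lower.items.find? (fun p => kw == p.2 || PySem.Str.isIn kw p.2)).map Prod.fst)

-- ===== PORT B =====
-- low = col.lower().strip()
def pvLow (c : String) : String := PySem.Str.strip (PySem.Str.lower c)

-- score(col): index of the first keyword contained in low, else len(keywords)
def pvScore (c : String) : Nat :=
  (pvKeywords.findIdx? (fun kw => PySem.Str.isIn kw (pvLow c))).getD pvKeywords.length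

def find_area_column_alt (columns : List String) : Option String :=
  let scores := columns.map pvScore
  let m := scores.foldl (fun m s => if s < m then s else m) pvKeywords.length
  if m < pvKeywords.length then columns.find? (fun c => pvScore c == m) else none

-- ===== PRECONDITION & SPEC =====
def Spec_find_area_column (columns : List String) (out : Option String) : Prop := out = find_area_column_alt columns
instance (columns : List String) (out : Option String) : Decidable (Spec_find_area_column columns out) := by unfold Spec_find_area_column; infer_instance

-- ===== CLAIM (what is proved, stated in full; the proofs are below) =====
def Claim_equal_find_area_column : Prop := ∀ (columns : List String), Dom_find_area_column columns → Spec_find_area_column columns (find_area_column columns)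

-- ===== LEMMAS AND PROOFS =====

-- score over an arbitrary keyword list (pvScore = scoreK pvKeywords)
def scoreK (ks : List String) (c : String) : Nat :=
  (ks.findIdx? (fun kw => PySem.Str.isIn kw (pvLow c))).getD ks.length

theorem pvScore_eq : pvScore = scoreK pvKeywords := rfl

-- 'kw == low or kw in low' is just 'kw in low'
theorem orEq_eq_isIn (a b : String) : (a == b || PySem.Str.isIn a b) = PySem.Str.isIn a b := by
  by_cases h : a = b
  · subst h
    have : PySem.Str.isIn a a = true := by
      rw [PySem.Str.isIn_iff_infix]
    simp only [this, Bool.or_true]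
  · simp [h]

-- A's dict comprehension: first occurrences, paired with their lowered/stripped form
theorem items_build (cs : List String) :
    (cs.foldl (fun d c => d.insert c (PySem.Str.strip (PySem.Str.lower c))) PySem.Dict.empty).items
      = (PySem.List.dedup cs).map (fun c => (c, pvLow c)) := by
  induction cs using List.reverseRecOn with
  | nil => rfl
  | append_singleton cs c ih =>
      rw [List.foldl_append, List.foldl_cons, List.foldl_nil, PySem.List.dedup_eq_ofList,
        PySem.Set.ofList_append_singleton]
      have hkeys : (cs.foldl (fun d c => d.insert c (PySem.Str.strip (PySem.Str.lower c))) PySem.Dict.empty).keys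
          = PySem.List.dedup cs := by
        simp only [PySem.Dict.keys, ih, List.map_map]
        simp [Function.comp_def]
      by_cases hc : c ∈ PySem.List.dedup cs
      · rw [PySem.Dict.items_insert_of_contains _ _ (by
          rw [PySem.Dict.contains_iff_mem_keys, hkeys]; exact hc)]
        rw [ih, PySem.Set.add_of_mem (by rwa [PySem.List.dedup_eq_ofList] at hc), List.map_map]
        apply List.map_congr_left
        intro x hx
        by_cases hxc : x = c
        · subst hxc; simp [pvLow]
        · simp [Function.comp_apply, hxc]
      · rw [PySem.Dict.items_insert_of_not_contains _ _ (by
          rw [Bool.eq_false_iff]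
          intro h
          exact hc (hkeys ▸ (PySem.Dict.contains_iff_mem_keys _ _).mp h))]
        rw [ih, PySem.Set.add_of_not_mem (by rwa [PySem.List.dedup_eq_ofList] at hc), List.map_append]
        rfl

-- dropping later duplicates does not change a first match
theorem find?_filter_ne (q : String → Bool) (x : String) (hq : q x = false) (s : List String) :
    (s.filter (fun y => !(y == x))).find? q = s.find? q := by
  induction s with
  | nil => rfl
  | cons y s ih =>
      by_cases hyx : y = x
      · subst hyx
        rw [List.filter_cons_of_neg (by simp), List.find?_cons_of_neg (by simp [hq]), ih]
      · rw [List.filter_cons_of_pos (by simp [hyx])]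
        cases hqy : q y
        · rw [List.find?_cons_of_neg (by simp [hqy]), List.find?_cons_of_neg (by simp [hqy]), ih]
        · rw [List.find?_cons_of_pos hqy, List.find?_cons_of_pos hqy]

-- first match over the deduplicated list = first match over the list
theorem find?_dedup (q : String → Bool) (cs : List String) :
    (PySem.List.dedup cs).find? q = cs.find? q := by
  induction cs with
  | nil => rfl
  | cons x xs ih =>
      rw [PySem.List.dedup_eq_ofList, PySem.Set.ofList_cons]
      cases hq : q x
      · rw [List.find?_cons_of_neg (by simp [hq]), List.find?_cons_of_neg (by simp [hq])]
        rw [PySem.Set.discard, find?_filter_ne q x hq]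
        rw [← PySem.List.dedup_eq_ofList, ih]
      · rw [List.find?_cons_of_pos hq, List.find?_cons_of_pos hq]

-- A without the dict: the plain keyword-priority scan over the column list
theorem A_plain (columns : List String) :
    find_area_column columns
      = pvKeywords.findSome? (fun kw => columns.find? (fun c => PySem.Str.isIn kw (pvLow c))) := by
  unfold find_area_column
  show pvKeywords.findSome? _ = _
  congr 1
  funext kw
  rw [items_build, List.find?_map, Option.map_map]
  have hp : ((fun p : String × String => kw == p.2 || PySem.Str.isIn kw p.2) ∘ (fun c => (c, pvLow c)))
      = fun c => PySem.Str.isIn kw (pvLow c) := by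
    funext c
    simp only [Function.comp_apply]
    exact orEq_eq_isIn kw (pvLow c)
  rw [hp, find?_dedup, show (Prod.fst ∘ fun c : String => (c, pvLow c)) = id from rfl,
    Option.map_id]
  rfl

theorem scoreK_cons (k : String) (ks : List String) (c : String) :
    scoreK (k :: ks) c = if PySem.Str.isIn k (pvLow c) then 0 else scoreK ks c + 1 := by
  simp only [scoreK, List.findIdx?_cons, List.length_cons]
  split
  · rfl
  · cases h : List.findIdx? (fun kw => PySem.Str.isIn kw (pvLow c)) ks <;> simp

theorem foldl_min_le_init (l : List Nat) (a : Nat) :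
    l.foldl (fun m s => if s < m then s else m) a ≤ a := by
  induction l generalizing a with
  | nil => exact le_refl a
  | cons s l ih =>
      simp only [List.foldl_cons]
      exact le_trans (ih _) (by split <;> omega)

theorem foldl_min_le_mem (l : List Nat) (a x : Nat) (hx : x ∈ l) :
    l.foldl (fun m s => if s < m then s else m) a ≤ x := by
  induction l generalizing a with
  | nil => cases hx
  | cons s l ih =>
      simp only [List.foldl_cons]
      rcases List.mem_cons.mp hx with h | h
      · subst h
        exact le_trans (foldl_min_le_init _ _) (by split <;> omega)
      · exact ih _ h

theorem foldl_min_shift (l : List Nat) (a : Nat) :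
    (l.map (· + 1)).foldl (fun m s => if s < m then s else m) (a + 1)
      = l.foldl (fun m s => if s < m then s else m) a + 1 := by
  induction l generalizing a with
  | nil => rfl
  | cons s l ih =>
      simp only [List.map_cons, List.foldl_cons]
      rw [show (if s + 1 < a + 1 then s + 1 else a + 1) = (if s < a then s else a) + 1 by
        split_ifs with h h' h' <;> omega]
      exact ih _

theorem find?_congr_mem (p q : String → Bool) (cs : List String)
    (h : ∀ c ∈ cs, p c = q c) : cs.find? p = cs.find? q := by
  induction cs with
  | nil => rfl
  | cons c cs ih =>
      have hc := h c (by simp)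
      by_cases hp : p c = true
      · rw [List.find?_cons_of_pos hp, List.find?_cons_of_pos (hc ▸ hp)]
      · have hp' : p c = false := by simpa using hp
        rw [List.find?_cons_of_neg (by simp [hp']), List.find?_cons_of_neg (by simp [hc ▸ hp']),
          ih (fun c hcm => h c (by simp [hcm]))]

theorem score_beq_zero (k : String) (ks : List String) (c : String) :
    (scoreK (k :: ks) c == 0) = PySem.Str.isIn k (pvLow c) := by
  rw [scoreK_cons]
  cases h : PySem.Str.isIn k (pvLow c) <;> simp

theorem score_beq_succ (k : String) (ks : List String) (c : String) (m : Nat)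
    (h : PySem.Str.isIn k (pvLow c) = false) :
    (scoreK (k :: ks) c == m + 1) = (scoreK ks c == m) := by
  rw [scoreK_cons, if_neg (by simp only [h]; exact Bool.false_ne_true)]
  cases hb : scoreK ks c == m
  · simp only [beq_eq_false_iff_ne] at hb ⊢; omega
  · simp only [beq_iff_eq] at hb ⊢; omega

-- the core equivalence: priority scan = score-and-select, for any keyword list
set_option maxHeartbeats 1000000 in
theorem main_lemma (ks : List String) (cs : List String) :
    ks.findSome? (fun kw => cs.find? (fun c => PySem.Str.isIn kw (pvLow c))) =
      (if ((cs.map (scoreK ks)).foldl (fun m s => if s < m then s else m) ks.length) < ks.length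
       then cs.find? (fun c => scoreK ks c == ((cs.map (scoreK ks)).foldl (fun m s => if s < m then s else m) ks.length))
       else none) := by
  induction ks with
  | nil =>
      simp only [List.findSome?_nil, List.length_nil]
      rw [if_neg (by omega)]
  | cons k ks ih =>
      rw [List.findSome?_cons]
      cases hf : cs.find? (fun c => PySem.Str.isIn k (pvLow c)) with
      | some c0 =>
          have hc0 : c0 ∈ cs := List.mem_of_find?_eq_some hf
          have hP : PySem.Str.isIn k (pvLow c0) = true := by simpa using List.find?_some hf
          have hs0 : scoreK (k :: ks) c0 = 0 := by rw [scoreK_cons, if_pos hP]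
          have hm : ((cs.map (scoreK (k :: ks))).foldl (fun m s => if s < m then s else m) (k :: ks).length) = 0 :=
            Nat.le_zero.mp (hs0 ▸ foldl_min_le_mem _ _ _ (List.mem_map_of_mem hc0))
          rw [hm, if_pos (by simp)]
          rw [find?_congr_mem (fun c => scoreK (k :: ks) c == 0) (fun c => PySem.Str.isIn k (pvLow c)) cs
            (fun c _ => score_beq_zero k ks c)]
          exact hf.symm
      | none =>
          have hall : ∀ c ∈ cs, PySem.Str.isIn k (pvLow c) = false := by
            intro c hcm
            simpa using List.find?_eq_none.mp hf c hcm
          have hmap : cs.map (scoreK (k :: ks)) = (cs.map (scoreK ks)).map (· + 1) := by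
            rw [List.map_map]
            apply List.map_congr_left
            intro c hcm
            simp only [Function.comp_apply]
            rw [scoreK_cons, if_neg (by simp only [hall c hcm]; exact Bool.false_ne_true)]
          rw [hmap, List.length_cons, foldl_min_shift]
          rw [ih]
          by_cases hlt : ((cs.map (scoreK ks)).foldl (fun m s => if s < m then s else m) ks.length) < ks.length
          · rw [if_pos hlt, if_pos (by omega)]
            apply find?_congr_mem
            intro c hcm
            beta_reduce
            exact (score_beq_succ k ks c
              ((cs.map (scoreK ks)).foldl (fun m s => if s < m then s else m) ks.length)
              (hall c hcm)).symm
          · rw [if_neg hlt, if_neg (by omega)]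

-- ===== VERDICT (by name: the statement is the Claim_ definition above) =====
theorem find_area_column_spec : Claim_equal_find_area_column := by
  intro columns _
  show find_area_column columns = find_area_column_alt columns
  rw [A_plain, main_lemma, ← pvScore_eq]
  rfl
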